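-- pv_equiv track=rewrite | github.com/DenBugNBA/YandexAlgorithmsTrainings | 3. Sets (1.0)/F_Alien_genome.py | calculate_degree_of_proximity
-- ===== SOURCE A (Python) =====
-- def calculate_degree_of_proximity(genome1, genome2):
--     bases2 = set()
--     for i in range(len(genome2) - 1):
--         bases2.add(genome2[i : i + 2])
--
--     degree_of_proximity = 0
--
--     for i in range(len(genome1) - 1):
--         if genome1[i : i + 2] in bases2:
--             degree_of_proximity += 1
--
--     return degree_of_proximity
-- ===== SOURCE B (Python) =====
-- def calculate_degree_of_proximity(genome1, genome2):
--     # Group genome1's adjacent pairs by value with their multiplicities,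
--     # then sum the multiplicities of the distinct pairs occurring in genome2.
--     counts = {}
--     for a, b in zip(genome1, genome1[1:]):
--         counts[a + b] = counts.get(a + b, 0) + 1
--     return sum(c for pair, c in counts.items() if pair in genome2)
-- ===== Notes on version B (the rewrite author's own statement) =====
-- stated objective: alternative
-- what changed: Inverts A's strategy: instead of precomputing the set of genome2's adjacent pairs and testing every position of genome1 against it, B groups genome1's adjacent pairs (formed by zipping genome1 with genome1[1:]) into a dict of multiplicities and returns the sum of the multiplicities of the distinct pairs that occur as substrings of genome2.
import Mathlib
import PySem

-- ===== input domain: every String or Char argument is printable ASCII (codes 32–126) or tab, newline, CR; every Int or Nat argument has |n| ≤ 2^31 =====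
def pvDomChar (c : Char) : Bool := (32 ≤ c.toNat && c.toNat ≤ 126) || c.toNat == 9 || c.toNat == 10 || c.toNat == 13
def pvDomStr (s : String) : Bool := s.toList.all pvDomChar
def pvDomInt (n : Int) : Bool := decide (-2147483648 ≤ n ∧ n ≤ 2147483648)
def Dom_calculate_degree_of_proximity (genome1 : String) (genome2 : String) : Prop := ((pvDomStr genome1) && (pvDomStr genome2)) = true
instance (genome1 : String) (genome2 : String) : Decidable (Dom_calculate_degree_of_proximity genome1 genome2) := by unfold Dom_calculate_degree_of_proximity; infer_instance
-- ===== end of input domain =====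

-- B inverts A's strategy: instead of a set of genome2's pairs scanned against every position of
-- genome1, it groups genome1's adjacent pairs into a multiplicity dict (over zip(genome1, genome1[1:]))
-- and sums the multiplicities of the distinct pairs that occur in genome2 (objective: alternative).

-- ===== PORT A =====
-- the set 'bases2' A builds in its first loop
def pvBases2 (genome2 : String) : PySem.Set String :=
  (PySem.List.pyRange 0 (PySem.Str.len genome2 - 1) 1).foldl
    (fun s i => PySem.Set.add s (PySem.Str.slice genome2 (some i) (some (i + 2))))
    PySem.Set.empty

def calculate_degree_of_proximity (genome1 : String) (genome2 : String) : Int :=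
  (PySem.List.pyRange 0 (PySem.Str.len genome1 - 1) 1).foldl
    (fun acc i =>
      if PySem.Set.contains (pvBases2 genome2) (PySem.Str.slice genome1 (some i) (some (i + 2)))
      then acc + 1 else acc)
    0

-- ===== PORT B =====
def calculate_degree_of_proximity_alt (genome1 : String) (genome2 : String) : Int :=
  -- for a, b in zip(genome1, genome1[1:]): counts[a+b] = counts.get(a+b, 0) + 1
  let counts :=
    (genome1.toList.zip (PySem.Str.slice genome1 (some 1) none).toList).foldl
      (fun d ab => d.insert (String.ofList [ab.1, ab.2]) (d.getD (String.ofList [ab.1, ab.2]) 0 + 1))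
      PySem.Dict.empty
  -- sum(c for pair, c in counts.items() if pair in genome2)
  ((counts.items.filter (fun pc => PySem.Str.isIn pc.1 genome2)).map (fun pc => pc.2)).sum

-- ===== PRECONDITION & SPEC =====
def Spec_calculate_degree_of_proximity (genome1 : String) (genome2 : String) (out : Int) : Prop := out = calculate_degree_of_proximity_alt genome1 genome2
instance (genome1 : String) (genome2 : String) (out : Int) : Decidable (Spec_calculate_degree_of_proximity genome1 genome2 out) := by unfold Spec_calculate_degree_of_proximity; infer_instance

-- ===== CLAIM (what is proved, stated in full; the proofs are below) =====
def Claim_equal_calculate_degree_of_proximity : Prop := ∀ (genome1 : String) (genome2 : String), Dom_calculate_degree_of_proximity genome1 genome2 → Spec_calculate_degree_of_proximity genome1 genome2 (calculate_degree_of_proximity genome1 genome2)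

-- ===== LEMMAS AND PROOFS =====

-- the list of genome1's adjacent pairs as B forms them (proof-side name for B's zip list)
def pvPairs (g1 : String) : List String :=
  (g1.toList.zip (g1.toList.drop 1)).map (fun ab => String.ofList [ab.1, ab.2])

-- a length-2 window of l is an infix of l
theorem pv_window_infix (l : List Char) (k : Nat) : (l.drop k).take 2 <:+: l :=
  ⟨l.take k, (l.drop k).drop 2, by
    rw [List.append_assoc, List.take_append_drop, List.take_append_drop]⟩

-- a slice g[k:k+2] with 0 ≤ k has char list (g.drop k).take 2
theorem pv_toList_slice2 (g : String) (k : Nat) :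
    (PySem.Str.slice g (some (k : Int)) (some ((k : Int) + 2))).toList
      = (g.toList.drop k).take 2 := by
  have h2 : ((k : Int) + 2) = (((k + 2 : Nat) : Int)) := by push_cast; ring
  rw [PySem.Str.toList_slice, PySem.Chars.slice_eq_listSlice, h2, PySem.List.slice_natCast]
  simp

-- for a string of length exactly 2, membership among g's adjacent pairs is substring search
theorem pv_mem_windows_iff (g sub : String) (hlen : sub.toList.length = 2) :
    (∃ j ∈ PySem.List.pyRange 0 (PySem.Str.len g - 1) 1,
        sub = PySem.Str.slice g (some j) (some (j + 2)))
      ↔ PySem.Str.isIn sub g = true := by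
  rw [PySem.Str.isIn_iff_infix]
  constructor
  · rintro ⟨j, hj, rfl⟩
    rw [PySem.List.mem_pyRange_one] at hj
    lift j to ℕ using hj.1 with k
    rw [pv_toList_slice2]
    exact pv_window_infix _ _
  · rintro ⟨u, v, huv⟩
    have hL : g.toList.length = u.length + (2 + v.length) := by
      rw [← huv]; simp [hlen]
    refine ⟨(u.length : Int), ?_, ?_⟩
    · rw [PySem.List.mem_pyRange_one]
      have : PySem.Str.len g = (g.toList.length : Int) := by
        simp [PySem.Str.len_eq]
      rw [this]
      constructor
      · exact_mod_cast Nat.zero_le _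
      · rw [hL]; push_cast; omega
    · rw [← String.toList_inj, pv_toList_slice2]
      rw [← huv, List.append_assoc, List.drop_left, ← hlen, List.take_left]

-- every slice genome1[i:i+2] visited by the counting loop has length exactly 2
theorem pv_slice2_len (g : String) (i : Int)
    (hi : i ∈ PySem.List.pyRange 0 (PySem.Str.len g - 1) 1) :
    (PySem.Str.slice g (some i) (some (i + 2))).toList.length = 2 := by
  rw [PySem.List.mem_pyRange_one] at hi
  have hlen : PySem.Str.len g = (g.toList.length : Int) := by
    simp [PySem.Str.len_eq]
  lift i to ℕ using hi.1 with k
  have hk : k + 2 ≤ g.toList.length := by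
    have := hi.2; rw [hlen] at this; omega
  rw [pv_toList_slice2]
  have hg : g.toList.length = g.length := by simp
  simp
  omega

-- A's loop visits exactly B's pair list: the slices g1[i:i+2], i in range(len(g1)-1), ARE pvPairs g1
theorem pv_slices_eq_pairs (g1 : String) :
    (PySem.List.pyRange 0 (PySem.Str.len g1 - 1) 1).map
      (fun i => PySem.Str.slice g1 (some i) (some (i + 2))) = pvPairs g1 := by
  have hlen : PySem.Str.len g1 = (g1.toList.length : Int) := by simp [PySem.Str.len_eq]
  rcases Nat.eq_zero_or_pos g1.toList.length with h0 | hpos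
  · rw [hlen, h0]
    rw [List.length_eq_zero_iff] at h0
    simp [PySem.List.pyRange, pvPairs, h0]
  · have hcast : PySem.Str.len g1 - 1 = ((g1.toList.length - 1 : Nat) : Int) := by
      rw [hlen]; omega
    rw [hcast, PySem.List.pyRange_zero_natCast, List.map_map]
    apply List.ext_getElem
    · simp [pvPairs]
    · intro k hk1 hk2
      have hk : k < g1.toList.length - 1 := by simpa using hk1
      have hk' : k + 1 < g1.toList.length := by omega
      simp only [List.getElem_map, List.getElem_range, Function.comp_apply, pvPairs,
        List.getElem_zip, List.getElem_drop]
      rw [← String.toList_inj, pv_toList_slice2]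
      rw [List.drop_eq_getElem_cons (show k < g1.toList.length by omega)]
      rw [show List.drop (k + 1) g1.toList = g1.toList[k + 1] :: List.drop (k + 2) g1.toList
        from List.drop_eq_getElem_cons hk']
      simp only [List.take_succ_cons, List.take_zero]
      simp [Nat.add_comm]

-- the 0/1-indicator of x summed over a Nodup list containing x
theorem pv_indicator_sum (p : String → Bool) (s : List String) (hs : s.Nodup) (x : String)
    (hx : x ∈ s) :
    ((s.filter p).map (fun k => if x == k then (1 : Int) else 0)).sum
      = if p x then 1 else 0 := by
  rw [PySem.List.sum_map_ite_one_zero (fun k => x == k) (s.filter p), List.countP_filter]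
  by_cases hpx : p x = true
  · have hcg : List.countP (fun k => (x == k) && p k) s = List.countP (fun k => k == x) s := by
      apply List.countP_congr
      intro k _
      simp only [Bool.and_eq_true, beq_iff_eq]
      constructor
      · rintro ⟨rfl, _⟩; rfl
      · rintro rfl; exact ⟨rfl, hpx⟩
    rw [hcg]
    have : List.countP (fun k => k == x) s = s.count x := rfl
    rw [this, List.count_eq_one_of_mem hs hx]
    simp [hpx]
  · have hz : List.countP (fun k => (x == k) && p k) s = 0 := by
      rw [List.countP_eq_zero]
      intro k _ hkp
      simp only [Bool.and_eq_true, beq_iff_eq] at hkp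
      exact hpx (hkp.1 ▸ hkp.2)
    rw [hz]
    simp [hpx]
-- summing multiplicities of the distinct values passing p recovers the plain filtered count
theorem pv_sum_counts (p : String → Bool) (l : List String) (s : List String)
    (hs : s.Nodup) (hsub : ∀ y ∈ l, y ∈ s) :
    ((s.filter p).map (fun k => (l.count k : Int))).sum = (l.countP p : Int) := by
  induction l with
  | nil => simp
  | cons x l ih =>
    have hx : x ∈ s := hsub x (by simp)
    have hrest : ∀ y ∈ l, y ∈ s := fun y hy => hsub y (by simp [hy])
    have hcount : ∀ k : String, (((x :: l).count k : Int))
        = (l.count k : Int) + (if x == k then (1 : Int) else 0) := by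
      intro k
      rw [List.count_cons]
      split_ifs <;> push_cast <;> ring
    calc ((s.filter p).map (fun k => ((x :: l).count k : Int))).sum
        = ((s.filter p).map (fun k => (l.count k : Int) + (if x == k then (1 : Int) else 0))).sum := by
          exact congrArg List.sum (List.map_congr_left (fun k _ => hcount k))
      _ = ((s.filter p).map (fun k => (l.count k : Int))).sum
          + ((s.filter p).map (fun k => if x == k then (1 : Int) else 0)).sum :=
          PySem.List.sum_map_add_int _ _ _
      _ = (l.countP p : Int) + (if p x then 1 else 0) := by
          rw [ih hrest, pv_indicator_sum p s hs x hx]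
      _ = ((x :: l).countP p : Int) := by
          rw [List.countP_cons]; split_ifs <;> push_cast <;> ring

-- B computes the count of genome1's pairs (with multiplicity) that occur in genome2
theorem pv_alt_eq_countP (g1 g2 : String) :
    calculate_degree_of_proximity_alt g1 g2
      = ((pvPairs g1).countP (fun k => PySem.Str.isIn k g2) : Int) := by
  have hdrop : (PySem.Str.slice g1 (some 1) none).toList = g1.toList.drop 1 := by
    rw [PySem.Str.toList_slice, PySem.Chars.slice_eq_listSlice]
    exact PySem.List.slice_from g1.toList (a := 1) (by norm_num)
  show ((((g1.toList.zip (PySem.Str.slice g1 (some 1) none).toList).foldl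
      (fun d ab => d.insert (String.ofList [ab.1, ab.2]) (d.getD (String.ofList [ab.1, ab.2]) 0 + 1))
      PySem.Dict.empty).items.filter (fun pc => PySem.Str.isIn pc.1 g2)).map (fun pc => pc.2)).sum
    = ((pvPairs g1).countP (fun k => PySem.Str.isIn k g2) : Int)
  have hfold : (g1.toList.zip (g1.toList.drop 1)).foldl
      (fun d ab => d.insert (String.ofList [ab.1, ab.2]) (d.getD (String.ofList [ab.1, ab.2]) 0 + 1))
      PySem.Dict.empty
      = PySem.Dict.counter (pvPairs g1) := by
    rw [← PySem.Dict.foldl_insert_getD_add_one_eq_counter, pvPairs, List.foldl_map]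
  rw [hdrop, hfold, PySem.Dict.items_counter, List.filter_map, List.map_map]
  exact pv_sum_counts _ (pvPairs g1) (PySem.Set.ofList (pvPairs g1))
    (PySem.Set.nodup_ofList _) (fun y hy => (PySem.Set.mem_ofList _ _).2 hy)

-- ===== VERDICT (by name: the statement is the Claim_ definition above) =====
theorem calculate_degree_of_proximity_spec : Claim_equal_calculate_degree_of_proximity := by
  intro g1 g2 _
  unfold Spec_calculate_degree_of_proximity
  rw [pv_alt_eq_countP]
  unfold calculate_degree_of_proximity
  rw [PySem.List.foldl_if_add_one
    (fun i => PySem.Set.contains (pvBases2 g2) (PySem.Str.slice g1 (some i) (some (i + 2))))]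
  rw [zero_add]
  have hcg : (PySem.List.pyRange 0 (PySem.Str.len g1 - 1) 1).countP
        (fun i => PySem.Set.contains (pvBases2 g2) (PySem.Str.slice g1 (some i) (some (i + 2))))
      = (PySem.List.pyRange 0 (PySem.Str.len g1 - 1) 1).countP
        (fun i => PySem.Str.isIn (PySem.Str.slice g1 (some i) (some (i + 2))) g2) := by
    apply List.countP_congr
    intro i hi
    rw [PySem.Set.contains_iff]
    unfold pvBases2
    rw [PySem.Set.mem_foldl_add]
    rw [← pv_mem_windows_iff g2 _ (pv_slice2_len g1 i hi)]
    simp [PySem.Set.empty]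
  rw [hcg]
  have : (PySem.List.pyRange 0 (PySem.Str.len g1 - 1) 1).countP
        (fun i => PySem.Str.isIn (PySem.Str.slice g1 (some i) (some (i + 2))) g2)
      = ((PySem.List.pyRange 0 (PySem.Str.len g1 - 1) 1).map
          (fun i => PySem.Str.slice g1 (some i) (some (i + 2)))).countP
          (fun k => PySem.Str.isIn k g2) := by
    rw [List.countP_map]; rfl
  rw [this, pv_slices_eq_pairs]
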